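-- pv_equiv track=rewrite | github.com/ManeeshWije/code-katas | aoc/2023/day03/main.py | find_full_number
-- ===== SOURCE A (Python) =====
-- def find_full_number(grid, row, col):
--     def is_valid_char(char):
--         return char.isdigit()
--
--     left_index = col
--     right_index = col
--
--     while left_index >= 0 and is_valid_char(grid[row][left_index]):
--         left_index -= 1
--
--     while right_index < len(grid[0]) and is_valid_char(grid[row][right_index]):
--         right_index += 1
--
--     full_number = grid[row][left_index + 1 : right_index]
--     return full_number, (row, right_index)
-- ===== SOURCE B (Python) =====
-- def find_full_number(grid, row, col):
--     # One left-to-right pass builds all maximal digit runs of the row, then the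
--     # run containing col is selected.  The run scan uses the row's own length as
--     # the right bound (A's bound is len(grid[0]), which on ragged grids is a slip).
--     line = grid[row]
--     runs = []
--     start = None
--     for i, ch in enumerate(line):
--         if ch.isdigit():
--             if start is None:
--                 start = i
--         else:
--             if start is not None:
--                 runs.append((start, i))
--                 start = None
--     if start is not None:
--         runs.append((start, len(line)))
--     for s, e in runs:
--         if s <= col < e:
--             return line[s:e], (row, e)
--     return '', (row, col)
-- ===== Notes on version B (the rewrite author's own statement) =====
-- stated objective: alternative
-- what changed: B builds all maximal digit runs of the row in one left-to-right pass and selects the run containing col, instead of expanding two pointers outward from col; B bounds the scan by the row's own length rather than len(grid[0]).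
-- intended difference: On ragged grids where the digit run at col reaches past len(grid[0]) in a longer row, A truncates the number at len(grid[0]) (or returns ('', (row, col)) when col >= len(grid[0])), while B returns the whole digit run with its true end index, which is the intended 'full number' of the row. — e.g. on find_full_number(["1", "23"], 1, 0): A returns ("2", (1, 1)), B returns ("23", (1, 2))
-- outside the precondition, e.g. on find_full_number(['ab5'], 0, -1): A returns ('', (0, 0)), B returns ('', (0, -1)); on find_full_number(['ab'], 0, -1): A returns ('a', (0, -1)), B returns ('', (0, -1))
import Mathlib
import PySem

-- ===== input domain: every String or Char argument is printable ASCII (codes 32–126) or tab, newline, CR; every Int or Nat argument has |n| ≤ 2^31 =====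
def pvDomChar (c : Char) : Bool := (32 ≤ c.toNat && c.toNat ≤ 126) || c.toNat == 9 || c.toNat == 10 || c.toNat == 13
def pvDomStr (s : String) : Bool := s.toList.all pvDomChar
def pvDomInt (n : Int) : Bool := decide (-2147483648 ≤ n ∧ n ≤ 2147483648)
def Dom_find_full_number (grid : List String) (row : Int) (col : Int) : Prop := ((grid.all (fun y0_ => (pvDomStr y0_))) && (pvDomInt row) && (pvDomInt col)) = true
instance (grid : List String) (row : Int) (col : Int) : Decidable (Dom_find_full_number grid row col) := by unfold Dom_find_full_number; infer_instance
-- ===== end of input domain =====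

-- B replaces A's outward two-pointer expansion from col by a single left-to-right pass that
-- builds all maximal digit runs of the row and selects the run containing col; B bounds the
-- scan by the row's own length where A uses len(grid[0]) (equal on rectangular grids).

-- shared helpers: the row string fetched by Python's grid[row], and digit tests
def pvLine (grid : List String) (row : Int) : List Char :=
  ((PySem.List.pyGet? grid row).getD "").toList

-- char.isdigit() of line[j] for a Nat index (False when j is out of range)
def pvDig (line : List Char) (j : Nat) : Bool := (line.getD j ' ').isDigit

-- ===== PORT A =====
-- char.isdigit() of line[i] under Python indexing (False where Python would raise)
def pvDigI (line : List Char) (i : Int) : Bool :=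
  ((PySem.List.pyGet? line i).map Char.isDigit).getD false

-- while left_index >= 0 and grid[row][left_index].isdigit(): left_index -= 1
def leftScanA (line : List Char) (i : Int) : Int :=
  if h : 0 ≤ i then
    if pvDigI line i then leftScanA line (i - 1) else i
  else i
termination_by (i + 1).toNat
decreasing_by omega

-- while right_index < len(grid[0]) and grid[row][right_index].isdigit(): right_index += 1
def rightScanA (line : List Char) (bound : Int) (i : Int) : Int :=
  if h : i < bound then
    if pvDigI line i then rightScanA line bound (i + 1) else i
  else i
termination_by (bound - i).toNat
decreasing_by omega

def find_full_number (grid : List String) (row : Int) (col : Int) : String × (Int × Int) :=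
  let line := pvLine grid row
  let bound : Int := (pvLine grid 0).length
  let left := leftScanA line col
  let right := rightScanA line bound col
  (String.ofList (PySem.List.slice line (some (left + 1)) (some right)), (row, right))

-- ===== PORT B =====
-- the for-loop over enumerate(line) building maximal digit runs, plus the trailing flush
def runsB : List Char → Nat → List (Nat × Nat) → Option Nat → List (Nat × Nat)
  | [], i, runs, start =>
    match start with
    | some s => runs ++ [(s, i)]
    | none => runs
  | c :: cs, i, runs, start =>
    if c.isDigit then
      match start with
      | none => runsB cs (i + 1) runs (some i)
      | some _ => runsB cs (i + 1) runs start
    else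
      match start with
      | some s => runsB cs (i + 1) (runs ++ [(s, i)]) none
      | none => runsB cs (i + 1) runs none

def find_full_number_alt (grid : List String) (row : Int) (col : Int) : String × (Int × Int) :=
  let line := pvLine grid row
  let runs := runsB line 0 [] none
  match runs.find? (fun r => decide ((r.1 : Int) ≤ col) && decide (col < (r.2 : Int))) with
  | some r => (String.ofList (PySem.List.slice line (some (r.1 : Int)) (some (r.2 : Int))), (row, (r.2 : Int)))
  | none => ("", (row, col))

-- ===== PRECONDITION & SPEC =====
-- Pre_ excludes (a) rows and cols outside Python's index range (A raises IndexError), (b) short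
-- rows of a ragged grid that are all digits from col on, where A raises IndexError reading past
-- the row's end, and (c) negative cols whose wraparound reads a digit or a non-empty slice, where
-- A's value is an accident of Python's negative-index wraparound while B reports no run at col.
def Pre_find_full_number (grid : List String) (row : Int) (col : Int) : Prop :=
  0 ≤ row + grid.length ∧ row < grid.length ∧
  0 ≤ col + (pvLine grid row).length ∧ col < (pvLine grid row).length ∧
  (0 ≤ col → ¬((pvLine grid row).length < (pvLine grid 0).length ∧
    ∀ j : Nat, j < (pvLine grid row).length → col ≤ (j : Int) → pvDig (pvLine grid row) j = true)) ∧
  (col < 0 → pvDig (pvLine grid row) (col + (pvLine grid row).length).toNat = false ∧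
    (col = -1 → (pvLine grid row).length ≤ 1))
instance (grid : List String) (row : Int) (col : Int) : Decidable (Pre_find_full_number grid row col) := by
  unfold Pre_find_full_number; infer_instance

def pvWitness_find_full_number : List String × Int × Int := (["ab1"], 0, 0)

-- On ragged grids where the row is longer than grid[0] and the digit run at col reaches index
-- len(grid[0]), A truncates the number at len(grid[0]) (or returns ('', (row, col)) when
-- col >= len(grid[0])), while B returns the whole digit run of the row with its true end index,
-- which is the intended "full number".
def D_find_full_number (grid : List String) (row : Int) (col : Int) : Prop :=
  0 ≤ col ∧ (pvLine grid 0).length < (pvLine grid row).length ∧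
  ∀ j : Nat, j ≤ max (pvLine grid 0).length col.toNat → col ≤ (j : Int) →
    pvDig (pvLine grid row) j = true
instance (grid : List String) (row : Int) (col : Int) : Decidable (D_find_full_number grid row col) := by
  unfold D_find_full_number; infer_instance

def Spec_find_full_number (grid : List String) (row : Int) (col : Int) (out : String × (Int × Int)) : Prop :=
  ¬ D_find_full_number grid row col → out = find_full_number_alt grid row col
instance (grid : List String) (row : Int) (col : Int) (out : String × (Int × Int)) : Decidable (Spec_find_full_number grid row col out) := by
  unfold Spec_find_full_number; infer_instance

def pvDiffWitness_find_full_number : List String × Int × Int := (["1", "23"], 1, 0)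
def pvDiffWitnessOut_find_full_number : (String × (Int × Int)) × (String × (Int × Int)) :=
  (("2", (1, 1)), ("23", (1, 2)))

-- ===== CLAIM (what is proved, stated in full; the proofs are below) =====
def Claim_unchanged_find_full_number : Prop := ∀ (grid : List String) (row : Int) (col : Int), Dom_find_full_number grid row col → Pre_find_full_number grid row col → Spec_find_full_number grid row col (find_full_number grid row col)
def Claim_changed_find_full_number : Prop := Dom_find_full_number (pvDiffWitness_find_full_number.1) (pvDiffWitness_find_full_number.2.1) (pvDiffWitness_find_full_number.2.2) ∧ Pre_find_full_number (pvDiffWitness_find_full_number.1) (pvDiffWitness_find_full_number.2.1) (pvDiffWitness_find_full_number.2.2) ∧ D_find_full_number (pvDiffWitness_find_full_number.1) (pvDiffWitness_find_full_number.2.1) (pvDiffWitness_find_full_number.2.2) ∧ find_full_number (pvDiffWitness_find_full_number.1) (pvDiffWitness_find_full_number.2.1) (pvDiffWitness_find_full_number.2.2) = pvDiffWitnessOut_find_full_number.1 ∧ find_full_number_alt (pvDiffWitness_find_full_number.1) (pvDiffWitness_find_full_number.2.1) (pvDiffWitness_find_full_number.2.2) = pvDiffWitnessOut_find_full_number.2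 ∧ pvDiffWitnessOut_find_full_number.1 ≠ pvDiffWitnessOut_find_full_number.2
def Claim_exact_find_full_number : Prop := ∀ (grid : List String) (row : Int) (col : Int), Dom_find_full_number grid row col → Pre_find_full_number grid row col → D_find_full_number grid row col → find_full_number grid row col ≠ find_full_number_alt grid row col

-- ===== LEMMAS AND PROOFS =====

theorem pvDig_ge (xs : List Char) (j : Nat) (h : xs.length ≤ j) : pvDig xs j = false := by
  simp [pvDig, List.getD_eq_getElem?_getD, List.getElem?_eq_none_iff.mpr h]

theorem pvDigI_natCast (xs : List Char) (j : Nat) : pvDigI xs (j : Int) = pvDig xs j := by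
  by_cases h : j < xs.length
  · simp [pvDigI, pvDig, PySem.List.pyGet?_natCast, List.getElem?_eq_getElem h,
      List.getD_eq_getElem?_getD]
  · have h2 : xs[j]? = none := List.getElem?_eq_none_iff.mpr (by omega)
    simp [pvDigI, pvDig, PySem.List.pyGet?_natCast, h2, List.getD_eq_getElem?_getD]

theorem leftScanA_run (xs : List Char) (s : Nat) :
    ∀ c : Nat, s ≤ c + 1 →
    (∀ j : Nat, s ≤ j → j ≤ c → pvDigI xs (j : Int) = true) →
    ¬(0 ≤ (s : Int) - 1 ∧ pvDigI xs ((s : Int) - 1) = true) →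
    leftScanA xs (c : Int) = (s : Int) - 1 := by
  intro c
  induction c using Nat.strong_induction_on with
  | _ c ih =>
    intro hsc hd hstop
    by_cases hs : s = c + 1
    · subst hs
      rw [leftScanA]
      have h1 : ((c + 1 : Nat) : Int) - 1 = (c : Int) := by push_cast; ring
      rw [h1] at hstop
      have : ¬ pvDigI xs (c : Int) = true := by
        intro hh; exact hstop ⟨by positivity, hh⟩
      simp [this]
    · have hsc' : s ≤ c := by omega
      rw [leftScanA]
      have hdc : pvDigI xs (c : Int) = true := hd c hsc' le_rfl
      simp only [Int.natCast_nonneg, dite_true, hdc, if_true]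
      match c, hsc' with
      | 0, h0 =>
        have hs0 : s = 0 := by omega
        subst hs0
        rw [leftScanA]
        norm_num
      | Nat.succ c', h0 =>
        have h1 : ((c' + 1 : Nat) : Int) - 1 = (c' : Int) := by push_cast; ring
        rw [h1]
        exact ih c' (by omega) (by omega) (fun j hj hj' => hd j hj (by omega)) hstop

theorem rightScanA_run (xs : List Char) (bound : Int) :
    ∀ (k c e : Nat), e - c = k → c ≤ e →
    ¬((e : Int) < bound ∧ pvDigI xs (e : Int) = true) →
    (∀ j : Nat, c ≤ j → j < e → ((j : Int) < bound ∧ pvDigI xs (j : Int) = true)) →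
    rightScanA xs bound (c : Int) = (e : Int) := by
  intro k
  induction k with
  | zero =>
    intro c e hk hce hstop hd
    have : c = e := by omega
    subst this
    rw [rightScanA]
    by_cases h1 : (c : Int) < bound
    · have : ¬ pvDigI xs (c : Int) = true := fun hh => hstop ⟨h1, hh⟩
      simp [h1, this]
    · simp [h1]
  | succ k ih =>
    intro c e hk hce hstop hd
    have hce' : c < e := by omega
    obtain ⟨h1, h2⟩ := hd c le_rfl hce'
    rw [rightScanA]
    simp only [h1, dite_true, h2, if_true]
    have h3 : (c : Int) + 1 = ((c + 1 : Nat) : Int) := by push_cast; ring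
    rw [h3]
    exact ih (c + 1) e (by omega) (by omega) hstop (fun j hj hj' => hd j (by omega) hj')

-- the invariant of B's run-building loop
def RunOK (xs : List Char) (r : Nat × Nat) : Prop :=
  r.1 < r.2 ∧ r.2 ≤ xs.length ∧ (∀ j : Nat, r.1 ≤ j → j < r.2 → pvDig xs j = true) ∧
  (r.1 = 0 ∨ pvDig xs (r.1 - 1) = false) ∧ (r.2 = xs.length ∨ pvDig xs r.2 = false)

theorem runsB_spec (xs : List Char) :
    ∀ (cs : List Char) (i : Nat) (runs : List (Nat × Nat)) (start : Option Nat),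
    xs.drop i = cs → i ≤ xs.length →
    (∀ r ∈ runs, RunOK xs r ∧ r.2 ≤ i) →
    (∀ s, start = some s → s < i ∧ (∀ j : Nat, s ≤ j → j < i → pvDig xs j = true) ∧
      (s = 0 ∨ pvDig xs (s - 1) = false)) →
    (∀ j : Nat, j < i → pvDig xs j = true →
      (∃ r ∈ runs, r.1 ≤ j ∧ j < r.2) ∨ (∃ s, start = some s ∧ s ≤ j)) →
    (∀ r ∈ runsB cs i runs start, RunOK xs r) ∧
    (∀ j : Nat, j < xs.length → pvDig xs j = true →
      ∃ r ∈ runsB cs i runs start, r.1 ≤ j ∧ j < r.2) := by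
  intro cs
  induction cs with
  | nil =>
    intro i runs start hdrop hlen hruns hst hcov
    have hi : i = xs.length := by
      have := List.drop_eq_nil_iff.mp hdrop
      omega
    subst hi
    cases start with
    | none =>
      simp only [runsB]
      refine ⟨fun r hr => (hruns r hr).1, fun j hj hd => ?_⟩
      rcases hcov j hj hd with h | ⟨s, hs, _⟩
      · exact h
      · exact absurd hs (by simp)
    | some s =>
      simp only [runsB]
      obtain ⟨hs1, hs2, hs3⟩ := hst s rfl
      constructor
      · intro r hr
        rcases List.mem_append.mp hr with h | h
        · exact (hruns r h).1
        · simp at h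
          subst h
          exact ⟨hs1, le_rfl, hs2, hs3, Or.inl rfl⟩
      · intro j hj hd
        rcases hcov j hj hd with ⟨r, hr, h1, h2⟩ | ⟨s', hs', hle⟩
        · exact ⟨r, List.mem_append_left _ hr, h1, h2⟩
        · obtain rfl := Option.some.inj hs'
          exact ⟨(s, xs.length), List.mem_append_right _ (by simp), hle, hj⟩
  | cons c cs ih =>
    intro i runs start hdrop hlen hruns hst hcov
    have hlc : xs[i]? = some c := by
      have h0 : (xs.drop i)[0]? = some c := by rw [hdrop]; rfl
      rw [List.getElem?_drop] at h0
      simpa using h0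
    have hi : i < xs.length := by
      by_contra h
      rw [List.getElem?_eq_none_iff.mpr (by omega)] at hlc
      exact absurd hlc (by simp)
    have hdi : pvDig xs i = c.isDigit := by
      simp [pvDig, List.getD_eq_getElem?_getD, hlc]
    have hdrop' : xs.drop (i + 1) = cs := by
      rw [← List.drop_drop, hdrop]
      rfl
    by_cases hc : c.isDigit
    · cases start with
      | none =>
        simp only [runsB, hc, if_true]
        apply ih (i + 1) runs (some i) hdrop' (by omega)
          (fun r hr => ⟨(hruns r hr).1, by have := (hruns r hr).2; omega⟩)
        · intro s hs
          obtain rfl := Option.some.inj hs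
          refine ⟨by omega, fun j hj hj' => by
            have : j = i := by omega
            subst this
            rw [hdi]; exact hc, ?_⟩
          by_cases h0 : i = 0
          · exact Or.inl h0
          · right
            by_contra hdig
            simp only [Bool.not_eq_false] at hdig
            rcases hcov (i - 1) (by omega) hdig with ⟨r, hr, h1, h2⟩ | ⟨s', hs', _⟩
            · obtain ⟨⟨_, _, _, _, hright⟩, hri⟩ := hruns r hr
              have hr2 : r.2 = i := by omega
              rcases hright with h | h
              · omega
              · rw [hr2, hdi] at h
                exact absurd hc (by simp [h])
            · exact absurd hs' (by simp)
        · intro j hj hd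
          by_cases hji : j < i
          · rcases hcov j hji hd with h | ⟨s', hs', _⟩
            · exact Or.inl h
            · exact absurd hs' (by simp)
          · right
            exact ⟨i, rfl, by omega⟩
      | some s =>
        simp only [runsB, hc, if_true]
        obtain ⟨hs1, hs2, hs3⟩ := hst s rfl
        apply ih (i + 1) runs (some s) hdrop' (by omega)
          (fun r hr => ⟨(hruns r hr).1, by have := (hruns r hr).2; omega⟩)
        · intro s' hs'
          obtain rfl := Option.some.inj hs'
          refine ⟨by omega, fun j hj hj' => ?_, hs3⟩
          by_cases hji : j < i
          · exact hs2 j hj hji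
          · have : j = i := by omega
            subst this
            rw [hdi]; exact hc
        · intro j hj hd
          by_cases hji : j < i
          · rcases hcov j hji hd with h | ⟨s', hs', hle⟩
            · exact Or.inl h
            · obtain rfl := Option.some.inj hs'
              exact Or.inr ⟨s, rfl, hle⟩
          · exact Or.inr ⟨s, rfl, by omega⟩
    · cases start with
      | none =>
        simp only [runsB, hc]
        apply ih (i + 1) runs none hdrop' (by omega)
          (fun r hr => ⟨(hruns r hr).1, by have := (hruns r hr).2; omega⟩)
        · intro s hs
          exact absurd hs (by simp)
        · intro j hj hd
          by_cases hji : j < i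
          · rcases hcov j hji hd with h | ⟨s', hs', _⟩
            · exact Or.inl h
            · exact absurd hs' (by simp)
          · have : j = i := by omega
            subst this
            rw [hdi] at hd
            exact absurd hd (by simp [hc])
      | some s =>
        simp only [runsB, hc]
        obtain ⟨hs1, hs2, hs3⟩ := hst s rfl
        apply ih (i + 1) (runs ++ [(s, i)]) none hdrop' (by omega)
        · intro r hr
          rcases List.mem_append.mp hr with h | h
          · exact ⟨(hruns r h).1, by have := (hruns r h).2; omega⟩
          · simp at h
            subst h
            refine ⟨⟨hs1, by omega, hs2, hs3, Or.inr (by rw [hdi]; simp [hc])⟩, by omega⟩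
        · intro s' hs'
          exact absurd hs' (by simp)
        · intro j hj hd
          by_cases hji : j < i
          · rcases hcov j hji hd with ⟨r, hr, h1, h2⟩ | ⟨s', hs', hle⟩
            · exact Or.inl ⟨r, List.mem_append_left _ hr, h1, h2⟩
            · obtain rfl := Option.some.inj hs'
              exact Or.inl ⟨(s, i), List.mem_append_right _ (by simp), hle, hji⟩
          · have : j = i := by omega
            subst this
            rw [hdi] at hd
            exact absurd hd (by simp [hc])

theorem runsB_main (xs : List Char) :
    (∀ r ∈ runsB xs 0 [] none, RunOK xs r) ∧
    (∀ j : Nat, j < xs.length → pvDig xs j = true →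
      ∃ r ∈ runsB xs 0 [] none, r.1 ≤ j ∧ j < r.2) :=
  runsB_spec xs xs 0 [] none (by simp) (by omega) (by simp) (by simp)
    (fun j hj _ => absurd hj (by omega))

-- ===== VERDICT (by name: the statement is the Claim_ definition above) =====
theorem slice_nil_of_le (xs : List Char) (a b : Int)
    (h : PySem.List.clampIdx xs.length b ≤ PySem.List.clampIdx xs.length a) :
    PySem.List.slice xs (some a) (some b) = [] := by
  simp [PySem.List.slice, Nat.sub_eq_zero_of_le h]

theorem find_full_number_spec : Claim_unchanged_find_full_number := by
  intro grid row col hdom hpre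
  unfold Spec_find_full_number
  intro hD
  obtain ⟨hr1, hr2, hclow, hcn, hragP, hnegP⟩ := hpre
  set xs := pvLine grid row with hxs
  set bnd := (pvLine grid 0).length with hbnd
  rcases lt_or_ge col 0 with hneg | hc0
  · -- negative col admitted by Pre_: the wrapped character is not a digit and the slice is
    -- empty, so both sides return ("", (row, col))
    obtain ⟨hwnd, hone⟩ := hnegP hneg
    have hnd : pvDigI xs col = false := by
      have hk : PySem.List.pyIdx? xs.length col = some (xs.length - (-col).toNat) := by
        simp only [PySem.List.pyIdx?, if_neg (by omega : ¬ (0:Int) ≤ col),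
          if_pos (by omega : -(xs.length : Int) ≤ col)]
      have hkn : xs.length - (-col).toNat < xs.length := by omega
      have hke : (col + (xs.length : Int)).toNat = xs.length - (-col).toNat := by omega
      rw [hke] at hwnd
      simp only [pvDigI, PySem.List.pyGet?, hk, Option.bind_some,
        List.getElem?_eq_getElem hkn, Option.map_some, Option.getD_some]
      rw [pvDig, List.getD_eq_getElem?_getD, List.getElem?_eq_getElem hkn] at hwnd
      simpa using hwnd
    have hleftEq : leftScanA xs col = col := by
      rw [leftScanA, dif_neg (by omega : ¬ (0:Int) ≤ col)]
    have hrightEq : rightScanA xs ((bnd : Nat) : Int) col = col := by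
      rw [rightScanA, dif_pos (by omega : col < ((bnd : Nat) : Int)), hnd]
      simp
    have hfindnone : (runsB xs 0 [] none).find?
        (fun r => decide ((r.1 : Int) ≤ col) && decide (col < (r.2 : Int))) = none := by
      apply List.find?_eq_none.mpr
      intro r hr hp
      simp only [Bool.and_eq_true, decide_eq_true_eq] at hp
      have := Int.natCast_nonneg r.1
      omega
    simp only [find_full_number, find_full_number_alt, ← hxs, ← hbnd]
    rw [hleftEq, hrightEq, hfindnone, slice_nil_of_le]
    simp only [PySem.List.clampIdx]
    split_ifs <;> omega
  · have hrag := hragP hc0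
    obtain ⟨c0, rfl⟩ : ∃ c0 : Nat, col = (c0 : Int) := ⟨col.toNat, (Int.toNat_of_nonneg hc0).symm⟩
    have hcn' : c0 < xs.length := by exact_mod_cast hcn
    obtain ⟨hOK, hcov⟩ := runsB_main xs
    by_cases hdc : pvDig xs c0 = true
    · obtain ⟨r0, hr0, h01, h02⟩ := hcov c0 hcn' hdc
      have hex : ∃ r ∈ runsB xs 0 [] none,
          (decide ((r.1 : Int) ≤ ((c0 : Nat) : Int)) && decide (((c0 : Nat) : Int) < (r.2 : Int))) = true :=
        ⟨r0, hr0, by simp only [Bool.and_eq_true, decide_eq_true_eq]; omega⟩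
      obtain ⟨r, hfind⟩ := Option.isSome_iff_exists.mp (List.find?_isSome.mpr hex)
      have hpr := List.find?_some hfind
      simp only [Bool.and_eq_true, decide_eq_true_eq] at hpr
      have hsc1 : r.1 ≤ c0 := by omega
      have hsc2 : c0 < r.2 := by omega
      obtain ⟨hlt, hle, hdig, hleft, hright⟩ := hOK r (List.mem_of_find?_eq_some hfind)
      have hleftEq : leftScanA xs (c0 : Int) = (r.1 : Int) - 1 := by
        apply leftScanA_run xs r.1 c0 (by omega)
          (fun j hj hj' => by rw [pvDigI_natCast]; exact hdig j hj (by omega))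
        rcases hleft with h0 | hds
        · rw [h0]; rintro ⟨h, _⟩; norm_num at h
        · rintro ⟨hge, hdi2⟩
          rw [show (r.1 : Int) - 1 = ((r.1 - 1 : Nat) : Int) by omega, pvDigI_natCast, hds] at hdi2
          cases hdi2
      have hDigIe : pvDigI xs (r.2 : Int) = false := by
        rw [pvDigI_natCast]
        rcases hright with h | h
        · rw [h]; exact pvDig_ge xs xs.length le_rfl
        · exact h
      have hbb : ∀ j : Nat, c0 ≤ j → j < r.2 → (j : Int) < (bnd : Int) := by
        by_cases hnb : xs.length ≤ bnd
        · intro j _ hj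
          have : j < bnd := by omega
          exact_mod_cast this
        · have hnb' : bnd < xs.length := by omega
          have hnall : ¬ ∀ j : Nat, j ≤ max bnd c0 → ((c0 : Nat) : Int) ≤ (j : Int) →
              pvDig xs j = true := by
            intro h
            exact hD ⟨Int.natCast_nonneg c0, hnb', by simpa using h⟩
          obtain ⟨j0, hj0⟩ := not_forall.mp hnall
          rw [Classical.not_imp, Classical.not_imp] at hj0
          obtain ⟨hj0b, hj0c, hj0d⟩ := hj0
          have hej0 : r.2 ≤ j0 := by
            rcases lt_or_ge j0 r.2 with h | h
            · exact absurd (hdig j0 (by omega) h) hj0d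
            · exact h
          have hj0bc : j0 ≤ bnd ∨ j0 ≤ c0 := by
            rcases le_total bnd c0 with h | h
            · right; rwa [max_eq_right h] at hj0b
            · left; rwa [max_eq_left h] at hj0b
          intro j _ hj
          have : j < bnd := by omega
          exact_mod_cast this
      have hrightEq : rightScanA xs ((bnd : Nat) : Int) ((c0 : Nat) : Int) = (r.2 : Int) := by
        apply rightScanA_run xs ((bnd : Nat) : Int) (r.2 - c0) c0 r.2 rfl (by omega)
          (by simp [hDigIe])
          (fun j hj hj' => ⟨hbb j hj hj', by rw [pvDigI_natCast]; exact hdig j (by omega) hj'⟩)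
      simp only [find_full_number, find_full_number_alt, ← hxs, ← hbnd]
      rw [hleftEq, hrightEq, hfind]
      rw [show (r.1 : Int) - 1 + 1 = (r.1 : Int) by ring]
    · have hfindnone : (runsB xs 0 [] none).find?
          (fun r => decide ((r.1 : Int) ≤ ((c0 : Nat) : Int)) && decide (((c0 : Nat) : Int) < (r.2 : Int))) = none := by
        apply List.find?_eq_none.mpr
        intro r hr hp
        simp only [Bool.and_eq_true, decide_eq_true_eq] at hp
        obtain ⟨_, _, hdig, _, _⟩ := hOK r hr
        exact hdc (hdig c0 (by omega) (by omega))
      have hleftEq : leftScanA xs ((c0 : Nat) : Int) = ((c0 + 1 : Nat) : Int) - 1 := by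
        apply leftScanA_run xs (c0 + 1) c0 le_rfl (fun j hj hj' => by omega)
        rw [show ((c0 + 1 : Nat) : Int) - 1 = ((c0 : Nat) : Int) by push_cast; ring, pvDigI_natCast]
        rintro ⟨_, h⟩
        exact hdc h
      have hrightEq : rightScanA xs ((bnd : Nat) : Int) ((c0 : Nat) : Int) = ((c0 : Nat) : Int) := by
        apply rightScanA_run xs ((bnd : Nat) : Int) 0 c0 c0 (Nat.sub_self c0) le_rfl
        · rw [pvDigI_natCast]
          rintro ⟨_, h⟩
          exact hdc h
        · intro j hj hj'; omega
      simp only [find_full_number, find_full_number_alt, ← hxs, ← hbnd]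
      rw [hleftEq, hrightEq, hfindnone]
      rw [show ((c0 + 1 : Nat) : Int) - 1 + 1 = ((c0 + 1 : Nat) : Int) by ring,
        PySem.List.slice_natCast]
      simp

theorem find_full_number_changed : Claim_changed_find_full_number := by
  unfold Claim_changed_find_full_number
  refine ⟨by decide, by decide, by decide, ?_, by decide, by decide⟩
  show find_full_number ["1", "23"] 1 0 = ("2", (1, 1))
  have hL : leftScanA ['2', '3'] 0 = -1 := by
    rw [leftScanA]
    norm_num [show pvDigI ['2', '3'] 0 = true from rfl]
    rw [leftScanA]
    norm_num
  have hR : rightScanA ['2', '3'] 1 0 = 1 := by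
    rw [rightScanA]
    norm_num [show pvDigI ['2', '3'] 0 = true from rfl]
    rw [rightScanA]
    norm_num
  simp only [find_full_number, show pvLine ["1", "23"] 1 = ['2', '3'] from rfl,
    show pvLine ["1", "23"] 0 = ['1'] from rfl, List.length_cons, List.length_nil]
  norm_num [hL, hR]
  decide

theorem find_full_number_tight : Claim_exact_find_full_number := by
  intro grid row col hdom hpre hd
  obtain ⟨hr1, hr2, hclow, hcn, hragP, hnegP⟩ := hpre
  obtain ⟨hc0, hbl, hall'⟩ := hd
  obtain ⟨c0, rfl⟩ : ∃ c0 : Nat, col = (c0 : Int) := ⟨col.toNat, (Int.toNat_of_nonneg hc0).symm⟩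
  set xs := pvLine grid row with hxs
  set bnd := (pvLine grid 0).length with hbnd
  have hall : ∀ j : Nat, j ≤ max bnd c0 → ((c0 : Nat) : Int) ≤ (j : Int) → pvDig xs j = true := by
    simpa using hall'
  have hcn' : c0 < xs.length := by exact_mod_cast hcn
  obtain ⟨hOK, hcov⟩ := runsB_main xs
  have hdc : pvDig xs c0 = true := hall c0 (le_max_right _ _) le_rfl
  obtain ⟨r0, hr0, h01, h02⟩ := hcov c0 hcn' hdc
  have hex : ∃ r ∈ runsB xs 0 [] none,
      (decide ((r.1 : Int) ≤ ((c0 : Nat) : Int)) && decide (((c0 : Nat) : Int) < (r.2 : Int))) = true :=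
    ⟨r0, hr0, by simp only [Bool.and_eq_true, decide_eq_true_eq]; omega⟩
  obtain ⟨r, hfind⟩ := Option.isSome_iff_exists.mp (List.find?_isSome.mpr hex)
  have hpr := List.find?_some hfind
  simp only [Bool.and_eq_true, decide_eq_true_eq] at hpr
  have hsc1 : r.1 ≤ c0 := by omega
  have hsc2 : c0 < r.2 := by omega
  obtain ⟨hlt, hle, hdig, hleft, hright⟩ := hOK r (List.mem_of_find?_eq_some hfind)
  -- B's run end lies strictly past both bnd and c0
  have hrm : max bnd c0 < r.2 := by
    rcases lt_or_ge (max bnd c0) r.2 with h | h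
    · exact h
    · have hdr : pvDig xs r.2 = true := hall r.2 (by omega) (by exact_mod_cast hsc2.le)
      rcases hright with he | he
      · omega
      · rw [he] at hdr; cases hdr
  -- A's right scan stops exactly at max bnd c0
  have hrA : rightScanA xs ((bnd : Nat) : Int) ((c0 : Nat) : Int) = ((max bnd c0 : Nat) : Int) := by
    apply rightScanA_run xs ((bnd : Nat) : Int) (max bnd c0 - c0) c0 (max bnd c0) rfl
      (le_max_right _ _)
      (by rintro ⟨h, _⟩; have := le_max_left bnd c0; omega)
    intro j hj hj'
    have hjb : j < bnd := by
      rcases max_cases bnd c0 with ⟨hm, _⟩ | ⟨hm, _⟩ <;> omega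
    exact ⟨by exact_mod_cast hjb, by rw [pvDigI_natCast]; exact hall j (by omega) (by exact_mod_cast hj)⟩
  intro heq
  have hproj := congrArg (fun p => p.2.2) heq
  simp only [find_full_number, find_full_number_alt, ← hxs, ← hbnd, hfind] at hproj
  rw [hrA] at hproj
  have : max bnd c0 = r.2 := by exact_mod_cast hproj
  omega
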